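-- pv_equiv track=rewrite | github.com/hwbest403/Portfolio | MathAI/1step-data/data_utils.py | convert_func_to_binary
-- ===== SOURCE A (Python) =====
-- def convert_func_to_binary(string):
--     string = string.replace('(', ' ( ')
--     string = string.replace(')', ' ) ')
--     string = string.replace(',', ' ')
--
--     elems = string.split()
--
--     results = []
--
--     for i, elem in enumerate(elems):
--         if elem != ')':
--             results.append(elem)
--         else:
--             right = results.pop()
--             left = results.pop()
--             left_paren = results.pop()
--             operator = results.pop()
--
--             output = f'{operator} {left} {right}'
--             results.append(output)
--
--     return results[0]
-- ===== SOURCE B (Python) =====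
-- def convert_func_to_binary(string):
--     string = string.replace('(', ' ( ')
--     string = string.replace(')', ' ) ')
--     string = string.replace(',', ' ')
--     toks = string.split()
--
--     def parse(rest):
--         node, rest = rest[0], rest[1:]
--         if rest and rest[0] == '(':
--             left, rest = parse(rest[1:])
--             right, rest = parse(rest)
--             if not rest or rest[0] != ')':
--                 raise ValueError('expected )')
--             node, rest = f'{node} {left} {right}', rest[1:]
--         return node, rest
--
--     return parse(toks)[0]
-- ===== Notes on version B (the rewrite author's own statement) =====
-- stated objective: alternative
-- what changed: Replaced the stack machine of A (push each non-closing token; on a closing parenthesis pop four entries and re-push the combined string) by a recursive-descent parser that parses one expression off the token list and returns it, ignoring trailing tokens as A does.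
-- outside the precondition, e.g. on convert_func_to_binary('f(a, b, c)'): A returns 'f', B raises ValueError; on convert_func_to_binary('a b c d ) e'): A returns 'a c d', B returns 'a'
import Mathlib
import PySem

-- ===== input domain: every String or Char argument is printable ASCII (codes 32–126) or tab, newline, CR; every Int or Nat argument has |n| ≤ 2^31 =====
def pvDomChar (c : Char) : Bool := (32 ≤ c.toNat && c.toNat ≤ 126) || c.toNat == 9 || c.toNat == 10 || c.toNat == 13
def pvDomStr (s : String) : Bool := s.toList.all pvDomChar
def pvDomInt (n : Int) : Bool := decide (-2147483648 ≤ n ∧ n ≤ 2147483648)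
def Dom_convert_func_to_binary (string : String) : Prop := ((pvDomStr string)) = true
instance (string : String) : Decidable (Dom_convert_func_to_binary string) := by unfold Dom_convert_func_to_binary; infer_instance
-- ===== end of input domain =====

-- B replaces A's stack machine (push tokens, pop four on ')') by a recursive-descent
-- parser over the token list: a genuinely different decomposition of the same task.

-- ===== PORT A =====
-- tokenization shared shape: replace parens/comma, then whitespace-split
def pvTokA (string : String) : List String :=
  PySem.Str.split₀
    (PySem.Str.replace (PySem.Str.replace (PySem.Str.replace string "(" " ( ") ")" " ) ") "," " ")

-- one iteration of A's loop; `none` = IndexError from `pop` on an empty list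
def pvStepA (acc : Option (List String)) (elem : String) : Option (List String) :=
  match acc with
  | none => none
  | some results =>
    if elem ≠ ")" then some (results ++ [elem])
    else
      -- right = pop(); left = pop(); left_paren = pop(); operator = pop(); append(output)
      match results.reverse with
      | right :: left :: _left_paren :: operator :: restRev =>
          some ((operator ++ " " ++ left ++ " " ++ right) :: restRev).reverse
      | _ => none

def convert_func_to_binary (string : String) : String :=
  match (pvTokA string).foldl pvStepA (some []) with
  | some results => (PySem.List.pyGet? results 0).getD ""   -- results[0]; none = IndexError, excluded by Pre_
  | none => ""

-- ===== PORT B =====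
def pvTokB (string : String) : List String :=
  PySem.Str.split₀
    (PySem.Str.replace (PySem.Str.replace (PySem.Str.replace string "(" " ( ") ")" " ) ") "," " ")

-- recursive-descent `parse`; fuel = number of tokens (each call consumes ≥ 1 token,
-- so fuel is never exhausted when the parse succeeds); `none` = IndexError/ValueError
def pvParseB : Nat → List String → Option (String × List String)
  | 0, _ => none
  | _ + 1, [] => none                       -- rest[0] on empty list: IndexError
  | f + 1, node :: rest =>
    if rest.head? = some "(" then           -- if rest and rest[0] == '('
      match pvParseB f rest.tail with
      | none => none
      | some (left, r2) =>
        match pvParseB f r2 with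
        | none => none
        | some (right, r3) =>
          if r3.head? = some ")" then
            some (node ++ " " ++ left ++ " " ++ right, r3.tail)
          else none                         -- ValueError: expected ')'
    else some (node, rest)

def convert_func_to_binary_alt (string : String) : String :=
  match pvParseB (pvTokB string).length (pvTokB string) with
  | some (e, _) => e
  | none => ""

-- ===== PRECONDITION & SPEC =====
-- membership in the call-expression grammar Expr := atom | atom '(' Expr Expr ')'
-- (atom = any non-')' token); used only by Pre_, independent of both ports; the
-- fuel argument (token count) only forces termination of the structural check
def pvChk : Nat → List String → Option (List String)
  | 0, _ => none
  | _ + 1, [] => none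
  | f + 1, a :: rest =>
    if a = ")" then none
    else if rest.head? = some "(" then
      match pvChk f rest.tail with
      | none => none
      | some r2 =>
        match pvChk f r2 with
        | none => none
        | some r3 => if r3.head? = some ")" then some r3.tail else none
    else some rest

def pvToksPre (string : String) : List String :=
  PySem.Str.split₀
    (PySem.Str.replace (PySem.Str.replace (PySem.Str.replace string "(" " ( ") ")" " ) ") "," " ")

def pvPreB (string : String) : Bool :=
  match pvChk (pvToksPre string).length (pvToksPre string) with
  | some rest => !rest.contains ")"
  | none => false

-- Pre_ excludes inputs whose token list does not start with a well-formed binary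
-- call expression, or whose trailing tokens contain a closing parenthesis: there A
-- either raises IndexError or returns an accidental residue of its stack discipline
-- (e.g. only the function name for a three-argument call) that no parser of the
-- stated format would produce.
def Pre_convert_func_to_binary (string : String) : Prop := pvPreB string = true
instance (string : String) : Decidable (Pre_convert_func_to_binary string) := by
  unfold Pre_convert_func_to_binary; infer_instance

def pvWitness_convert_func_to_binary : String := "mul(add(a, b), c)"

def Spec_convert_func_to_binary (string : String) (out : String) : Prop := out = convert_func_to_binary_alt string
instance (string : String) (out : String) : Decidable (Spec_convert_func_to_binary string out) := by unfold Spec_convert_func_to_binary; infer_instance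

-- ===== CLAIM (what is proved, stated in full; the proofs are below) =====
def Claim_equal_convert_func_to_binary : Prop := ∀ (string : String), Dom_convert_func_to_binary string → Pre_convert_func_to_binary string → Spec_convert_func_to_binary string (convert_func_to_binary string)

-- ===== LEMMAS AND PROOFS =====

-- a checked expression parses (same fuel) and, on A's side, folding its tokens just
-- pushes the converted expression onto the stack
lemma pvMain : ∀ (f : Nat) (ts rest : List String), pvChk f ts = some rest →
    ∃ e, pvParseB f ts = some (e, rest) ∧
      ∀ st : List String, List.foldl pvStepA (some st) ts = List.foldl pvStepA (some (st ++ [e])) rest := by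
  intro f
  induction f with
  | zero => intro ts rest h; simp [pvChk] at h
  | succ f ih =>
    intro ts rest h
    match ts with
    | [] => simp [pvChk] at h
    | a :: rest0 =>
      rw [pvChk] at h
      by_cases ha : a = ")"
      · simp [ha] at h
      · rw [if_neg ha] at h
        by_cases hh : rest0.head? = some "("
        · rw [if_pos hh] at h
          obtain ⟨t, ht⟩ : ∃ t, rest0 = "(" :: t := by
            cases rest0 with
            | nil => simp at hh
            | cons b t => exact ⟨t, by simp at hh; rw [hh]⟩
          subst ht
          simp only [List.tail_cons] at h
          cases h1 : pvChk f t with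
          | none => rw [h1] at h; simp at h
          | some r2 =>
            rw [h1] at h; dsimp only at h
            cases h2 : pvChk f r2 with
            | none => rw [h2] at h; simp at h
            | some r3 =>
              rw [h2] at h; dsimp only at h
              by_cases hb : r3.head? = some ")"
              · rw [if_pos hb] at h
                obtain ⟨r4, hr4⟩ : ∃ r4, r3 = ")" :: r4 := by
                  cases r3 with
                  | nil => simp at hb
                  | cons c r4 => exact ⟨r4, by simp at hb; rw [hb]⟩
                subst hr4
                simp only [List.tail_cons, Option.some.injEq] at h
                subst h
                obtain ⟨e1, hp1, hf1⟩ := ih t r2 h1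
                obtain ⟨e2, hp2, hf2⟩ := ih r2 (")" :: r4) h2
                refine ⟨a ++ " " ++ e1 ++ " " ++ e2, ?_, ?_⟩
                · rw [pvParseB]; simp [hp1, hp2]
                · intro st
                  have hstep1 : pvStepA (some st) a = some (st ++ [a]) := by
                    simp [pvStepA, ha]
                  have hstep2 : pvStepA (some (st ++ [a])) "(" = some (st ++ [a] ++ ["("]) := by
                    simp [pvStepA]
                  have hstep3 : pvStepA (some (st ++ [a] ++ ["("] ++ [e1] ++ [e2])) ")"
                      = some (st ++ [a ++ " " ++ e1 ++ " " ++ e2]) := by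
                    simp [pvStepA]
                  calc List.foldl pvStepA (some st) (a :: "(" :: t)
                      = List.foldl pvStepA (some (st ++ [a] ++ ["("])) t := by
                        rw [List.foldl_cons, List.foldl_cons, hstep1, hstep2]
                    _ = List.foldl pvStepA (some (st ++ [a] ++ ["("] ++ [e1])) r2 := hf1 _
                    _ = List.foldl pvStepA (some (st ++ [a] ++ ["("] ++ [e1] ++ [e2])) (")" :: r4) := hf2 _
                    _ = List.foldl pvStepA (some (st ++ [a ++ " " ++ e1 ++ " " ++ e2])) r4 := by
                        rw [List.foldl_cons, hstep3]
              · rw [if_neg hb] at h; simp at h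
        · rw [if_neg hh] at h
          simp only [Option.some.injEq] at h
          subst h
          refine ⟨a, ?_, ?_⟩
          · rw [pvParseB, if_neg hh]
          · intro st
            rw [List.foldl_cons]
            have : pvStepA (some st) a = some (st ++ [a]) := by simp [pvStepA, ha]
            rw [this]

-- trailing tokens without ')' are only ever pushed
lemma pvNoParen : ∀ (rest st : List String), rest.contains ")" = false →
    List.foldl pvStepA (some st) rest = some (st ++ rest) := by
  intro rest
  induction rest with
  | nil => intro st _; simp
  | cons a t ih =>
    intro st hc
    simp only [List.contains_cons, Bool.or_eq_false_iff] at hc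
    have ha : a ≠ ")" := by
      intro h; subst h; simp at hc
    have : pvStepA (some st) a = some (st ++ [a]) := by simp [pvStepA, ha]
    simp only [List.foldl, this, ih (st ++ [a]) hc.2]
    simp

-- ===== VERDICT (by name: the statement is the Claim_ definition above) =====
theorem convert_func_to_binary_spec : Claim_equal_convert_func_to_binary := by
  intro s _hdom hpre
  unfold Pre_convert_func_to_binary pvPreB at hpre
  cases heq : pvChk (pvToksPre s).length (pvToksPre s) with
  | none => rw [heq] at hpre; simp at hpre
  | some rest =>
    rw [heq] at hpre
    simp only [Bool.not_eq_true'] at hpre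
    obtain ⟨e, hp, hf⟩ := pvMain _ _ _ heq
    have htokA : pvTokA s = pvToksPre s := rfl
    have htokB : pvTokB s = pvToksPre s := rfl
    unfold Spec_convert_func_to_binary convert_func_to_binary convert_func_to_binary_alt
    rw [htokA, htokB, hp, hf []]
    simp only [List.nil_append]
    rw [pvNoParen rest [e] hpre]
    simp [PySem.List.pyGet?, PySem.List.pyIdx?]
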